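-- pv_equiv track=rewrite | github.com/edcull/planetfall | planetfall/engine/combat/initial_missions.py | _zones_within_range
-- ===== SOURCE A (Python) =====
-- def _zones_within_range(
--     origin: tuple[int, int], max_zones: int, rows: int, cols: int,
-- ) -> list[tuple[int, int]]:
--     """All zones within max_zones Chebyshev distance of origin."""
--     r0, c0 = origin
--     result = []
--     for r in range(rows):
--         for c in range(cols):
--             dist = max(abs(r - r0), abs(c - c0))
--             if 0 < dist <= max_zones:
--                 result.append((r, c))
--     return result
-- ===== SOURCE B (Python) =====
-- def _zones_within_range(
--     origin: tuple[int, int], max_zones: int, rows: int, cols: int,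
-- ) -> list[tuple[int, int]]:
--     """All zones within max_zones Chebyshev distance of origin."""
--     r0, c0 = origin
--     lo_r, hi_r = max(0, r0 - max_zones), min(rows, r0 + max_zones + 1)
--     lo_c, hi_c = max(0, c0 - max_zones), min(cols, c0 + max_zones + 1)
--     out = []
--     for r in range(lo_r, hi_r):
--         if r == r0 and lo_c <= c0 < hi_c:
--             out.extend((r, c) for c in range(lo_c, c0))
--             out.extend((r, c) for c in range(c0 + 1, hi_c))
--         else:
--             out.extend((r, c) for c in range(lo_c, hi_c))
--     return out
-- ===== Notes on version B (the rewrite author's own statement) =====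
-- stated objective: alternative
-- what changed: Instead of scanning all rows*cols cells and testing each cell's Chebyshev distance, B iterates only the clamped (2*max_zones+1)^2 window and emits each row as whole range segments with no per-cell test, splitting the origin's row into the two ranges left and right of the origin column; intended as faster for small max_zones (a timing run measured large speed-ups there but could not confirm it at the largest sizes, where the window covers the whole grid).
import Mathlib
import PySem

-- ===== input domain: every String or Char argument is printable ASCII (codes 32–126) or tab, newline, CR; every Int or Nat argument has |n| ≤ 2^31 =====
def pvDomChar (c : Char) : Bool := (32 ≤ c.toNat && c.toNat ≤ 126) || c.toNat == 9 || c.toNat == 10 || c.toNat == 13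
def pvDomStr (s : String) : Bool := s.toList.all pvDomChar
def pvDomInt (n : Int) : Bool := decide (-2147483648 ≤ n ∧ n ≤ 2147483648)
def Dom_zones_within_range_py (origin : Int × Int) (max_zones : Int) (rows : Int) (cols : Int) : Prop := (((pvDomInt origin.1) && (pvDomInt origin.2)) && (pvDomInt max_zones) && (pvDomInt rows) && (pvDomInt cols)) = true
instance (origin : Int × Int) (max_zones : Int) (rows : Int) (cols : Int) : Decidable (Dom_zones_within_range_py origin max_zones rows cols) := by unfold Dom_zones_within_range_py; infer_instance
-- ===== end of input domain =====

-- B emits whole range segments of the clamped window (the origin's row split around the origin column) instead of testing every grid cell's distance.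

-- ===== PORT A =====
def zones_within_range_py (origin : Int × Int) (max_zones : Int) (rows : Int) (cols : Int) : List (Int × Int) :=
  let r0 := origin.1
  let c0 := origin.2
  (PySem.List.pyRange 0 rows 1).foldl (fun result r =>
    (PySem.List.pyRange 0 cols 1).foldl (fun result c =>
      let dist := max |r - r0| |c - c0|
      if 0 < dist ∧ dist ≤ max_zones then result ++ [(r, c)] else result) result) []

-- ===== PORT B =====
def zones_within_range_py_alt (origin : Int × Int) (max_zones : Int) (rows : Int) (cols : Int) : List (Int × Int) :=
  let r0 := origin.1
  let c0 := origin.2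
  let loR := max 0 (r0 - max_zones)
  let hiR := min rows (r0 + max_zones + 1)
  let loC := max 0 (c0 - max_zones)
  let hiC := min cols (c0 + max_zones + 1)
  (PySem.List.pyRange loR hiR 1).foldl (fun out r =>
    if r = r0 ∧ loC ≤ c0 ∧ c0 < hiC then
      out ++ (PySem.List.pyRange loC c0 1).map (fun c => (r, c))
          ++ (PySem.List.pyRange (c0 + 1) hiC 1).map (fun c => (r, c))
    else
      out ++ (PySem.List.pyRange loC hiC 1).map (fun c => (r, c))) []

-- ===== PRECONDITION & SPEC =====
def Spec_zones_within_range_py (origin : Int × Int) (max_zones : Int) (rows : Int) (cols : Int) (out : List (Int × Int)) : Prop := out = zones_within_range_py_alt origin max_zones rows cols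
instance (origin : Int × Int) (max_zones : Int) (rows : Int) (cols : Int) (out : List (Int × Int)) : Decidable (Spec_zones_within_range_py origin max_zones rows cols out) := by unfold Spec_zones_within_range_py; infer_instance

-- ===== CLAIM (what is proved, stated in full; the proofs are below) =====
def Claim_equal_zones_within_range_py : Prop := ∀ (origin : Int × Int) (max_zones : Int) (rows : Int) (cols : Int), Dom_zones_within_range_py origin max_zones rows cols → Spec_zones_within_range_py origin max_zones rows cols (zones_within_range_py origin max_zones rows cols)

-- ===== LEMMAS AND PROOFS =====

-- filtering a unit-step range by an interval is the clamped range
theorem pv_filter_pyRange (lo hi : Int) : ∀ (n : Nat) (a b : Int), (b - a).toNat = n →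
    (PySem.List.pyRange a b 1).filter (fun x => decide (lo ≤ x ∧ x < hi))
      = PySem.List.pyRange (max a lo) (min b hi) 1 := by
  intro n
  induction n with
  | zero =>
    intro a b h
    rw [PySem.List.pyRange_one_eq_nil (by omega), PySem.List.pyRange_one_eq_nil (by omega)]
    rfl
  | succ k ih =>
    intro a b h
    rw [PySem.List.pyRange_one_cons (by omega)]
    by_cases hc : lo ≤ a ∧ a < hi
    · rw [List.filter_cons_of_pos (by simpa using hc), ih (a + 1) b (by omega)]
      rw [show max (a + 1) lo = a + 1 by omega]
      rw [show max a lo = a by omega]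
      rw [(PySem.List.pyRange_one_cons (a := a) (b := min b hi) (by omega))]
    · rw [List.filter_cons_of_neg (by simpa using hc), ih (a + 1) b (by omega)]
      rcases not_and_or.mp hc with h1 | h2
      · congr 1; omega
      · rw [PySem.List.pyRange_one_eq_nil (by omega), PySem.List.pyRange_one_eq_nil (by omega)]

-- a flatMap may drop the elements on which the function is nil
theorem pv_flatMap_filter {α β : Type} (p : α → Bool) (g : α → List β) :
    ∀ (l : List α), (∀ x ∈ l, p x = false → g x = []) →
      l.flatMap g = (l.filter p).flatMap g := by
  intro l
  induction l with
  | nil => intro _; rfl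
  | cons x xs ih =>
    intro h
    by_cases hp : p x = true
    · simp [List.flatMap_cons, List.filter_cons_of_pos hp,
        ih (fun y hy => h y (List.mem_cons_of_mem _ hy))]
    · have hx : g x = [] := h x (List.mem_cons_self) (by simpa using hp)
      simp [List.flatMap_cons, List.filter_cons_of_neg (by simpa using hp), hx,
        ih (fun y hy => h y (List.mem_cons_of_mem _ hy))]

-- pointwise congruence for flatMap
theorem pv_flatMap_congr {α β : Type} {l : List α} {f g : α → List β}
    (h : ∀ x ∈ l, f x = g x) : l.flatMap f = l.flatMap g := by
  induction l with
  | nil => rfl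
  | cons x xs ih =>
    simp [List.flatMap_cons, h x (List.mem_cons_self),
      ih (fun y hy => h y (List.mem_cons_of_mem _ hy))]

theorem zones_equal (origin : Int × Int) (max_zones rows cols : Int) :
    zones_within_range_py origin max_zones rows cols
      = zones_within_range_py_alt origin max_zones rows cols := by
  obtain ⟨r0, c0⟩ := origin
  set m := max_zones with hm
  set loC := max 0 (c0 - m) with hloC
  set hiC := min cols (c0 + m + 1) with hhiC
  -- A as a flatMap of filtered column ranges
  have hA : zones_within_range_py (r0, c0) m rows cols
      = (PySem.List.pyRange 0 rows 1).flatMap (fun r =>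
          ((PySem.List.pyRange 0 cols 1).filter
            (fun c => decide (0 < max |r - r0| |c - c0| ∧ max |r - r0| |c - c0| ≤ m))).map
            (fun c => (r, c))) := by
    unfold zones_within_range_py
    have hfun : (fun (result : List (Int × Int)) (r : Int) =>
        (PySem.List.pyRange 0 cols 1).foldl (fun result c =>
          if 0 < max |r - r0| |c - c0| ∧ max |r - r0| |c - c0| ≤ m then result ++ [(r, c)]
          else result) result)
        = (fun result r =>
          result ++ ((PySem.List.pyRange 0 cols 1).filter
            (fun c => decide (0 < max |r - r0| |c - c0| ∧ max |r - r0| |c - c0| ≤ m))).map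
            (fun c => (r, c))) := by
      funext result r
      rw [PySem.List.foldl_append_ite]
    simp only [hfun]
    rw [PySem.List.foldl_append_eq_flatMap]
    simp
  -- B as a flatMap of its per-row segment builder
  have hB : zones_within_range_py_alt (r0, c0) m rows cols
      = (PySem.List.pyRange (max 0 (r0 - m)) (min rows (r0 + m + 1)) 1).flatMap (fun r =>
          if r = r0 ∧ loC ≤ c0 ∧ c0 < hiC then
            (PySem.List.pyRange loC c0 1).map (fun c => (r, c))
              ++ (PySem.List.pyRange (c0 + 1) hiC 1).map (fun c => (r, c))
          else (PySem.List.pyRange loC hiC 1).map (fun c => (r, c))) := by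
    unfold zones_within_range_py_alt
    have hfun : (fun (out : List (Int × Int)) (r : Int) =>
        if r = r0 ∧ loC ≤ c0 ∧ c0 < hiC then
          out ++ (PySem.List.pyRange loC c0 1).map (fun c => (r, c))
              ++ (PySem.List.pyRange (c0 + 1) hiC 1).map (fun c => (r, c))
        else out ++ (PySem.List.pyRange loC hiC 1).map (fun c => (r, c)))
        = (fun out r => out ++
            (if r = r0 ∧ loC ≤ c0 ∧ c0 < hiC then
              (PySem.List.pyRange loC c0 1).map (fun c => (r, c))
                ++ (PySem.List.pyRange (c0 + 1) hiC 1).map (fun c => (r, c))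
            else (PySem.List.pyRange loC hiC 1).map (fun c => (r, c)))) := by
      funext out r
      split_ifs <;> simp
    simp only [hloC, hhiC] at hfun ⊢
    simp only [hfun]
    rw [PySem.List.foldl_append_eq_flatMap]
    simp
  rw [hA, hB]
  -- turn B's clamped row range into a filter of the full row range
  rw [← pv_filter_pyRange (r0 - m) (r0 + m + 1) (rows - 0).toNat 0 rows rfl]
  -- A: drop the rows whose inner list is empty
  rw [pv_flatMap_filter (fun r => decide (r0 - m ≤ r ∧ r < r0 + m + 1)) _
    (PySem.List.pyRange 0 rows 1)
    (by
      intro r _ hr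
      simp only [decide_eq_false_iff_not, not_and_or, not_le, not_lt] at hr
      rw [List.filter_eq_nil_iff.mpr ?_]
      · rfl
      · intro c _
        simp only [decide_eq_true_eq, not_and, not_le, max_le_iff, lt_max_iff, abs_le,
          abs_pos, sub_ne_zero]
        omega)]
  apply pv_flatMap_congr
  intro r hr
  have hrw : r0 - m ≤ r ∧ r < r0 + m + 1 := by
    have := List.of_mem_filter hr
    simpa using this
  by_cases hr0 : r = r0 ∧ loC ≤ c0 ∧ c0 < hiC
  · -- origin row, origin column inside the window: split at c0
    rw [if_pos hr0]
    obtain ⟨hre, hc1, hc2⟩ := hr0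
    subst hre
    have hc0a : (0 : Int) ≤ c0 := by simp only [hloC] at hc1; omega
    have hc0b : c0 ≤ cols := by simp only [hhiC] at hc2; omega
    rw [PySem.List.pyRange_one_append 0 c0 cols hc0a hc0b, List.filter_append]
    -- left part: predicate ↔ c0-m ≤ c < c0
    have hL : (PySem.List.pyRange 0 c0 1).filter
        (fun c => decide (0 < max |r - r| |c - c0| ∧ max |r - r| |c - c0| ≤ m))
        = PySem.List.pyRange loC c0 1 := by
      rw [List.filter_congr (q := fun c => decide (c0 - m ≤ c ∧ c < c0)) ?_,
        pv_filter_pyRange (c0 - m) c0 (c0 - 0).toNat 0 c0 rfl]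
      · rw [hloC]; congr 1; omega
      · intro c hc
        have hcb := (PySem.List.mem_pyRange_one).mp hc
        simp only [decide_eq_decide, max_le_iff, lt_max_iff, abs_le, abs_pos, sub_ne_zero]
        omega
    -- right part: predicate ↔ c0+1 ≤ c < c0+m+1
    have hR : (PySem.List.pyRange c0 cols 1).filter
        (fun c => decide (0 < max |r - r| |c - c0| ∧ max |r - r| |c - c0| ≤ m))
        = PySem.List.pyRange (c0 + 1) hiC 1 := by
      rw [List.filter_congr (q := fun c => decide (c0 + 1 ≤ c ∧ c < c0 + m + 1)) ?_,
        pv_filter_pyRange (c0 + 1) (c0 + m + 1) (cols - c0).toNat c0 cols rfl]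
      · rw [hhiC]; congr 1; omega
      · intro c hc
        have hcb := (PySem.List.mem_pyRange_one).mp hc
        have hm0 : (0 : Int) ≤ m := by omega
        simp only [decide_eq_decide, max_le_iff, lt_max_iff, abs_le, abs_pos, sub_ne_zero]
        omega
    rw [hL, hR, List.map_append]
  · -- other rows (or origin column outside the grid): whole clamped column range
    rw [if_neg hr0]
    rw [List.filter_congr (q := fun c => decide (c0 - m ≤ c ∧ c < c0 + m + 1)) ?_,
      pv_filter_pyRange (c0 - m) (c0 + m + 1) (cols - 0).toNat 0 cols rfl]
    intro c hc
    have hcb := (PySem.List.mem_pyRange_one).mp hc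
    have hm0 : (0 : Int) ≤ m := by omega
    simp only [not_and_or, hloC, hhiC] at hr0
    simp only [decide_eq_decide, max_le_iff, lt_max_iff, abs_le, abs_pos, sub_ne_zero]
    rcases hr0 with h | h | h
    · have : r ≠ r0 := h
      omega
    · omega
    · omega

-- ===== VERDICT (by name: the statement is the Claim_ definition above) =====
theorem zones_within_range_py_spec : Claim_equal_zones_within_range_py := by
  intro origin max_zones rows cols _
  unfold Spec_zones_within_range_py
  exact zones_equal origin max_zones rows cols
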